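-- pv_equiv track=rewrite | github.com/vikasrathee/Coding | peak-finding.py | get_local_peak_hanle_plateau
-- ===== SOURCE A (Python) =====
-- def get_local_peak_hanle_plateau(A):
--     if len(A) == 0:
--         return []
--     if len(A) == 1:
--         return [0]
--
--     res = []
--     start = False
--
--     for i in range(1, len(A)):
--
--         if A[i] > A[i-1]:
--             start = True
--             peak_index = i
--         elif A[i] < A[i-1] and start == True:
--             start = False
--             res.append(peak_index)
--
--     return res
-- ===== SOURCE B (Python) =====
-- def _runs_from(prev, i, xs):
--     """Maximal runs of equal values in xs as (value, start_index) pairs, given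
--     the value `prev` just before xs and the index `i` of xs[0]."""
--     runs = []
--     for x in xs:
--         if x != prev:
--             runs.append((x, i))
--             prev = x
--         i += 1
--     return runs
--
--
-- def _interior(prev, runs):
--     """Start indices of runs strictly above both neighbours; the last run (and
--     the implicit first run, of value `prev`) is never emitted."""
--     res = []
--     for (v, s), (w, _) in zip(runs, runs[1:]):
--         if v > prev and v > w:
--             res.append(s)
--         prev = v
--     return res
--
--
-- def get_local_peak_hanle_plateau(A):
--     if len(A) == 0:
--         return []
--     if len(A) == 1:
--         return [0]
--     return _interior(A[0], _runs_from(A[0], 1, A[1:]))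
-- ===== Notes on version B (the rewrite author's own statement) =====
-- stated objective: alternative
-- what changed: A's single stateful index loop (rising flag + remembered peak index) is replaced by run-length compressing the list into (value, start-index) runs and then scanning adjacent runs, emitting the start of every run strictly above both neighbouring runs.
import Mathlib
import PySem

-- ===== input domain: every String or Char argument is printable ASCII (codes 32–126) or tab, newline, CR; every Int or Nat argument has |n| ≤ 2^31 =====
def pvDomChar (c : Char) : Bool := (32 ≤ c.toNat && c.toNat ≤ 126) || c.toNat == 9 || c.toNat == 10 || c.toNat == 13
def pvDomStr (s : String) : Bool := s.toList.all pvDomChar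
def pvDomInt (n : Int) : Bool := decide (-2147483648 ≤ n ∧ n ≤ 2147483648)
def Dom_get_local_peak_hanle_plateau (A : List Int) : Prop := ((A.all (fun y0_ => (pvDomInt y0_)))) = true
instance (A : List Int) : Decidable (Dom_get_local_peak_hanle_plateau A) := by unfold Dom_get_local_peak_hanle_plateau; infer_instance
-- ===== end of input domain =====

-- B replaces A's stateful index loop by run-length compression plus a scan of adjacent runs (alternative decomposition, same cost).


-- ===== PORT A =====
-- state (res, start, peak_index); Python's uninitialized peak_index is 0 here (only read after start=True set it)
def pvStepA (A : List Int) (s : List Int × Bool × Int) (i : Int) : List Int × Bool × Int :=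
  if PySem.List.pyGetD A i 0 > PySem.List.pyGetD A (i - 1) 0 then (s.1, true, i)
  else if PySem.List.pyGetD A i 0 < PySem.List.pyGetD A (i - 1) 0 ∧ s.2.1 = true then
    (s.1 ++ [s.2.2], false, s.2.2)
  else s

def get_local_peak_hanle_plateau (A : List Int) : List Int :=
  if A.length = 0 then []
  else if A.length = 1 then [0]
  else ((PySem.List.pyRange 1 (A.length : Int) 1).foldl (pvStepA A) ([], false, 0)).1

-- ===== PORT B =====
-- _runs_from: for-loop appending a (value, start_index) pair whenever the value changes
def pvRunsF (prev i : Int) (xs : List Int) : List (Int × Int) :=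
  (xs.foldl (fun (st : List (Int × Int) × Int × Int) x =>
      if x ≠ st.2.1 then (st.1 ++ [(x, st.2.2)], x, st.2.2 + 1) else (st.1, st.2.1, st.2.2 + 1))
    ([], prev, i)).1

-- _interior: for-loop over zip(runs, runs[1:]) carrying prev, appending peak-run starts
def pvInteriorF (prev : Int) (runs : List (Int × Int)) : List Int :=
  ((List.zip runs runs.tail).foldl (fun (st : List Int × Int) p =>
      ((if p.1.1 > st.2 ∧ p.1.1 > p.2.1 then st.1 ++ [p.1.2] else st.1), p.1.1))
    ([], prev)).1

def get_local_peak_hanle_plateau_alt (A : List Int) : List Int :=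
  match A with
  | [] => []
  | [_] => [0]
  | a :: rest => pvInteriorF a (pvRunsF a 1 rest)

-- ===== PRECONDITION & SPEC =====
def Spec_get_local_peak_hanle_plateau (A : List Int) (out : List Int) : Prop := out = get_local_peak_hanle_plateau_alt A
instance (A : List Int) (out : List Int) : Decidable (Spec_get_local_peak_hanle_plateau A out) := by unfold Spec_get_local_peak_hanle_plateau; infer_instance

-- ===== CLAIM (what is proved, stated in full; the proofs are below) =====
def Claim_equal_get_local_peak_hanle_plateau : Prop := ∀ (A : List Int), Dom_get_local_peak_hanle_plateau A → Spec_get_local_peak_hanle_plateau A (get_local_peak_hanle_plateau A)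

-- ===== LEMMAS AND PROOFS =====

-- recursive forms of B's two loops, used only by the proofs
def pvRunsFrom (prev i : Int) (xs : List Int) : List (Int × Int) :=
  match xs with
  | [] => []
  | x :: rest => if x = prev then pvRunsFrom prev (i + 1) rest
                 else (x, i) :: pvRunsFrom x (i + 1) rest

def pvInterior (prev : Int) (runs : List (Int × Int)) : List Int :=
  match runs with
  | [] => []
  | [_] => []
  | (v, s) :: (w, t) :: rest =>
      (if v > prev ∧ v > w then [s] else []) ++ pvInterior v ((w, t) :: rest)

theorem pvRunsF_eq (xs : List Int) : ∀ (acc : List (Int × Int)) (prev i : Int),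
    (xs.foldl (fun (st : List (Int × Int) × Int × Int) x =>
      if x ≠ st.2.1 then (st.1 ++ [(x, st.2.2)], x, st.2.2 + 1) else (st.1, st.2.1, st.2.2 + 1))
      (acc, prev, i)).1 = acc ++ pvRunsFrom prev i xs := by
  induction xs with
  | nil => intro acc prev i; simp [pvRunsFrom]
  | cons x rest ih =>
    intro acc prev i
    by_cases hx : x = prev
    · subst hx
      simp only [List.foldl_cons]
      rw [if_neg (by simp), ih, pvRunsFrom, if_pos rfl]
    · simp only [List.foldl_cons, ne_eq, if_pos hx]
      rw [ih, pvRunsFrom, if_neg hx, List.append_assoc, List.singleton_append]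

theorem pvInteriorF_eq (runs : List (Int × Int)) : ∀ (res : List Int) (prev : Int),
    ((List.zip runs runs.tail).foldl (fun (st : List Int × Int) p =>
      ((if p.1.1 > st.2 ∧ p.1.1 > p.2.1 then st.1 ++ [p.1.2] else st.1), p.1.1))
      (res, prev)).1 = res ++ pvInterior prev runs := by
  induction runs with
  | nil => intro res prev; simp [pvInterior]
  | cons hd tl ih =>
    intro res prev
    obtain ⟨v, s⟩ := hd
    cases tl with
    | nil => simp [pvInterior]
    | cons hd' tl' =>
      obtain ⟨w, t⟩ := hd'
      have ih' := ih
      simp only [List.tail_cons] at ih' ⊢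
      simp only [List.zip_cons_cons, List.foldl_cons]
      rw [ih']
      rw [pvInterior]
      by_cases hc : v > prev ∧ v > w
      · rw [if_pos hc, if_pos hc]; simp
      · rw [if_neg hc, if_neg hc]; simp

-- A's loop, written structurally over the suffix being scanned (prev = value before it, i = index of head)
def pvLoopAux (prev i : Int) (st : List Int × Bool × Int) (xs : List Int) : List Int × Bool × Int :=
  match xs with
  | [] => st
  | x :: rest =>
    if x > prev then pvLoopAux x (i + 1) (st.1, true, i) rest
    else if x < prev ∧ st.2.1 = true then pvLoopAux x (i + 1) (st.1 ++ [st.2.2], false, st.2.2) rest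
    else pvLoopAux x (i + 1) st rest

-- emissions of A's loop expressed over the run decomposition
def pvH (start : Bool) (pk prev : Int) (runs : List (Int × Int)) : List Int :=
  match runs with
  | [] => []
  | (v, s) :: rest => (if start = true ∧ v < prev then [pk] else []) ++ pvH (decide (v > prev)) s v rest

theorem pvH_false_pk (pk pk' prev : Int) (rs : List (Int × Int)) :
    pvH false pk prev rs = pvH false pk' prev rs := by
  cases rs with
  | nil => rfl
  | cons hd tl => cases hd; simp [pvH]

theorem pvLoopAux_eq_pvH (xs : List Int) : ∀ (prev i : Int) (res : List Int) (start : Bool) (pk : Int),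
    (pvLoopAux prev i (res, start, pk) xs).1 = res ++ pvH start pk prev (pvRunsFrom prev i xs) := by
  induction xs with
  | nil => intro prev i res start pk; simp [pvLoopAux, pvRunsFrom, pvH]
  | cons x rest ih =>
    intro prev i res start pk
    by_cases hgt : x > prev
    · have hne : ¬ x = prev := by omega
      simp only [pvLoopAux, pvRunsFrom, if_pos hgt, if_neg hne]
      rw [ih]
      simp [pvH, hgt, show ¬ x < prev by omega]
    · by_cases hlt : x < prev
      · have hne : ¬ x = prev := by omega
        simp only [pvLoopAux, pvRunsFrom, if_neg hgt, if_neg hne]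
        cases start with
        | true =>
          rw [if_pos (by simp [hlt])]
          rw [ih]
          simp [pvH, hlt, hgt]
          rw [pvH_false_pk pk i]
        | false =>
          rw [if_neg (by simp)]
          rw [ih]
          simp [pvH, hlt, hgt]
          rw [pvH_false_pk pk i]
      · have heq : x = prev := by omega
        subst heq
        simp only [pvLoopAux, pvRunsFrom, if_pos rfl, if_neg hgt,
          if_neg (show ¬ (x < x ∧ start = true) by simp)]
        exact ih x (i + 1) res start pk

theorem pvH_false_eq_interior (rs : List (Int × Int)) : ∀ (prev pk : Int),
    pvH false pk prev rs = pvInterior prev rs := by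
  induction rs with
  | nil => intro prev pk; rfl
  | cons hd tl ih =>
    intro prev pk
    obtain ⟨v, s⟩ := hd
    cases tl with
    | nil => simp [pvH, pvInterior]
    | cons hd' tl' =>
      obtain ⟨w, t⟩ := hd'
      have h2 := ih v pk
      simp only [pvH] at h2 ⊢
      simp only [Bool.false_eq_true, false_and, if_false, List.nil_append] at h2 ⊢
      rw [pvInterior]
      rw [← h2]
      by_cases hvp : v > prev <;> simp [hvp]

-- bridge: the index fold over range(k, len A) is pvLoopAux on the dropped suffix
theorem foldl_pyRange_eq_loopAux (A : List Int) : ∀ (n k : Nat), A.length - k = n → 1 ≤ k → k ≤ A.length →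
    ∀ (st : List Int × Bool × Int),
    (PySem.List.pyRange (k : Int) (A.length : Int) 1).foldl (pvStepA A) st
      = pvLoopAux (A.getD (k - 1) 0) (k : Int) st (A.drop k) := by
  intro n
  induction n with
  | zero =>
    intro k hn h1 h2 st
    have hk : k = A.length := by omega
    subst hk
    rw [show PySem.List.pyRange (A.length : Int) (A.length : Int) 1 = [] by
      rw [PySem.List.pyRange_one]; simp]
    rw [List.drop_length]
    rfl
  | succ n ih =>
    intro k hn h1 h2 st
    have hk : k < A.length := by omega
    rw [PySem.List.pyRange_one_cons (by exact_mod_cast hk)]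
    rw [List.foldl_cons]
    have hg0 : PySem.List.pyGetD A (k : Int) 0 = A[k] := by
      rw [PySem.List.pyGetD_natCast, List.getD_eq_getElem A 0 hk]
    have hg1 : PySem.List.pyGetD A ((k : Int) - 1) 0 = A.getD (k - 1) 0 := by
      rw [show (k : Int) - 1 = ((k - 1 : Nat) : Int) by omega, PySem.List.pyGetD_natCast]
    have hcast : (k : Int) + 1 = ((k + 1 : Nat) : Int) := by push_cast; ring
    have ih' := fun st => ih (k + 1) (by omega) (by omega) (by omega) st
    rw [show A.getD (k + 1 - 1) 0 = A[k] from by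
      rw [Nat.add_sub_cancel, List.getD_eq_getElem A 0 hk]] at ih'
    rw [List.drop_eq_getElem_cons hk]
    unfold pvStepA pvLoopAux
    rw [hg0, hg1]
    by_cases hb1 : A[k] > A.getD (k - 1) 0
    · rw [if_pos hb1, if_pos hb1, hcast]; exact ih' _
    · rw [if_neg hb1, if_neg hb1]
      by_cases hb2 : A[k] < A.getD (k - 1) 0 ∧ st.2.1 = true
      · rw [if_pos hb2, if_pos hb2, hcast]; exact ih' _
      · rw [if_neg hb2, if_neg hb2, hcast]; exact ih' _

-- ===== VERDICT (by name: the statement is the Claim_ definition above) =====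
theorem get_local_peak_hanle_plateau_spec : Claim_equal_get_local_peak_hanle_plateau := by
  intro A _
  unfold Spec_get_local_peak_hanle_plateau
  match A with
  | [] => rfl
  | [a] => rfl
  | a :: b :: t =>
    unfold get_local_peak_hanle_plateau get_local_peak_hanle_plateau_alt
    have hlen : (a :: b :: t).length = t.length + 2 := by simp
    rw [if_neg (by simp), if_neg (by simp)]
    have hb := foldl_pyRange_eq_loopAux (a :: b :: t) ((a :: b :: t).length - 1) 1 rfl (by omega) (by simp) ([], false, 0)
    simp only [Nat.cast_one] at hb
    rw [hb]
    simp only [List.drop_succ_cons, List.drop_zero, Nat.sub_self, List.getD_cons_zero]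
    rw [pvLoopAux_eq_pvH]
    rw [pvH_false_eq_interior]
    show _ = pvInteriorF a (pvRunsF a 1 (b :: t))
    unfold pvInteriorF pvRunsF
    rw [pvRunsF_eq]
    rw [pvInteriorF_eq]
    simp
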